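-- pv_equiv track=rewrite | github.com/Boistov/Python-recursion | task4.py | sum_of_subsequence
-- ===== SOURCE A (Python) =====
-- def sum_of_subsequence(sequence):
--     if not sequence:
--         return 0
--     else:
--         head, *tail = sequence
--         if head % 2 == 0:
--             return head + sum_of_subsequence(tail)
--         else:
--             return sum_of_subsequence(tail)
-- ===== SOURCE B (Python) =====
-- def sum_of_subsequence(sequence):
--     total = 0
--     for x in sequence:
--         if x % 2 == 0:
--             total += x
--     return total
-- ===== Notes on version B (the rewrite author's own statement) =====
-- stated objective: faster
-- what changed: Replaced the head/tail recursion (whose 'head, *tail' unpacking copies the list at every level) with an iterative single pass using an accumulator loop.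
import Mathlib
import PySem

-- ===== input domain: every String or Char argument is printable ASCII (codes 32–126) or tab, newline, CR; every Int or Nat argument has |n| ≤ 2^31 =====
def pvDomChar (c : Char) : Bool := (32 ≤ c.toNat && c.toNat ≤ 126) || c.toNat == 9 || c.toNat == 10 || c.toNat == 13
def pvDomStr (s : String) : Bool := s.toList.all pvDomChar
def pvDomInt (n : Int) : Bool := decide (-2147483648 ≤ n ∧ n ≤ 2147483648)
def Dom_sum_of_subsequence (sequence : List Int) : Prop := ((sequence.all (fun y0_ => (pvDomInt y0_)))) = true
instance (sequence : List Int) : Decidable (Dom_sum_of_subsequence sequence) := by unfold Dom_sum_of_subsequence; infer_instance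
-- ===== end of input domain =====

-- B replaces A's head/tail recursion (which copies the list each level) with a single accumulator pass: faster.


-- ===== PORT A =====
def sum_of_subsequence (sequence : List Int) : Int :=
  match sequence with
  | [] => 0
  | head :: tail =>
      if PySem.Int.mod head 2 == 0 then head + sum_of_subsequence tail
      else sum_of_subsequence tail

-- ===== PORT B =====
def sum_of_subsequence_alt (sequence : List Int) : Int :=
  sequence.foldl (fun total x => if PySem.Int.mod x 2 == 0 then total + x else total) 0

-- ===== PRECONDITION & SPEC =====
def Spec_sum_of_subsequence (sequence : List Int) (out : Int) : Prop := out = sum_of_subsequence_alt sequence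
instance (sequence : List Int) (out : Int) : Decidable (Spec_sum_of_subsequence sequence out) := by unfold Spec_sum_of_subsequence; infer_instance

-- ===== CLAIM (what is proved, stated in full; the proofs are below) =====
def Claim_equal_sum_of_subsequence : Prop := ∀ (sequence : List Int), Dom_sum_of_subsequence sequence → Spec_sum_of_subsequence sequence (sum_of_subsequence sequence)

-- ===== LEMMAS AND PROOFS =====
-- foldl with a starting accumulator equals the accumulator plus A's recursive sum
theorem alt_foldl_shift (sequence : List Int) (acc : Int) :
    sum_of_subsequence sequence =
      sequence.foldl (fun total x => if PySem.Int.mod x 2 == 0 then total + x else total) acc - acc := by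
  induction sequence generalizing acc with
  | nil => simp [sum_of_subsequence]
  | cons h t ih =>
    simp only [sum_of_subsequence, List.foldl_cons]
    by_cases hc : PySem.Int.mod h 2 == 0
    · rw [if_pos hc, if_pos hc, ih (acc + h)]; omega
    · rw [if_neg hc, if_neg hc, ih acc]

-- ===== VERDICT (by name: the statement is the Claim_ definition above) =====
theorem sum_of_subsequence_spec : Claim_equal_sum_of_subsequence := by
  intro sequence _
  unfold Spec_sum_of_subsequence sum_of_subsequence_alt
  rw [alt_foldl_shift sequence 0]; omega
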